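-- pv_equiv track=rewrite | github.com/Scottcosseboomcornell/nys_ai_pest_db | web_application_old/pesticide_search.py | _filter_application_info_for_allowed_crops
-- ===== SOURCE A (Python) =====
-- def _is_crop_variant(crop, allowed_crop):
--     """Check if a crop is a variant of an allowed crop (handles plurals and different capitalizations)."""
--     crop_lower = crop.lower()
--     allowed_lower = allowed_crop.lower()
--
--     # Direct match (already handled above, but good to have)
--     if crop_lower == allowed_lower:
--         return True
--
--     # Check if one is plural of the other
--     if crop_lower == allowed_lower + 's':
--         return True
--     if allowed_lower == crop_lower + 's':
--         return True
--
--     # Handle special pluralization cases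
--     plural_mappings = {
--         'almond': 'almonds',
--         'apricot': 'apricots',
--         'walnut': 'walnuts',
--         'nectarine': 'nectarines',
--         'orange': 'oranges',
--         'grape': 'grapes',
--         'bean': 'beans',
--         'beet': 'beets',
--         'potato': 'potatoes',
--         'tomato': 'tomatoes',
--         'pepper': 'peppers',
--         'strawberry': 'strawberries',
--         'blueberry': 'blueberries',
--         'cranberry': 'cranberries',
--         'raspberry': 'raspberries',
--         'blackberry': 'blackberries',
--         'cherry': 'cherries'
--     }
--
--     # Check both directions of the mapping
--     for singular, plural in plural_mappings.items():
--         if (crop_lower == singular and allowed_lower == plural) or (crop_lower == plural and allowed_lower == singular):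
--             return True
--
--     return False
--
-- def _filter_application_info_for_allowed_crops(application_info):
--     """Filter application info to only show applications for allowed crops."""
--     if not application_info:
--         return []
--
--     # Define the allowed crops from the AI prompt (from ai_main_o4_chat.py)
--     allowed_crops = ["Apple", "Blackberry", "Blueberry", "Grape", "Cherry", "Cranberry", "Peach", "Pear", "Pecan",
--                     "Strawberry", "Spinach", "Nectarine", "Orange", "Pepper", "Tomato", "Almond", "Apricot",
--                     "Potato", "Raspberry", "Walnut", "Cucumber", "Broccoli"]
--
--     filtered_apps = []
--     for app in application_info:
--         crops_str = app.get('Target_Crop', '') or ''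
--         if not crops_str or crops_str == 'N/A':
--             continue
--
--         # Split comma-separated crops and check each one
--         crops = [c.strip() for c in crops_str.split(',') if c.strip()]
--         allowed_crops_in_app = []
--
--         for crop in crops:
--             # Check if this crop matches any of the allowed crops
--             crop_matches = False
--             for allowed_crop in allowed_crops:
--                 # Direct match (case-insensitive)
--                 if crop.lower() == allowed_crop.lower():
--                     crop_matches = True
--                     break
--                 # Check if crop is a plural/singular form of allowed crop
--                 if _is_crop_variant(crop, allowed_crop):
--                     crop_matches = True
--                     break
--
--             if crop_matches:
--                 allowed_crops_in_app.append(crop)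
--
--         # Only include this application if it has at least one allowed crop
--         if allowed_crops_in_app:
--             # Create a new app entry with only the allowed crops
--             filtered_app = app.copy()
--             filtered_app['Target_Crop'] = ', '.join(allowed_crops_in_app)
--             filtered_apps.append(filtered_app)
--
--     return filtered_apps
-- ===== SOURCE B (Python) =====
-- def _filter_application_info_for_allowed_crops(application_info):
--     """Filter application info to only show applications for allowed crops."""
--     if not application_info:
--         return []
--
--     allowed_crops = ["Apple", "Blackberry", "Blueberry", "Grape", "Cherry", "Cranberry", "Peach", "Pear", "Pecan",
--                     "Strawberry", "Spinach", "Nectarine", "Orange", "Pepper", "Tomato", "Almond", "Apricot",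
--                     "Potato", "Raspberry", "Walnut", "Cucumber", "Broccoli"]
--     plural_mappings = {
--         'almond': 'almonds', 'apricot': 'apricots', 'walnut': 'walnuts', 'nectarine': 'nectarines',
--         'orange': 'oranges', 'grape': 'grapes', 'bean': 'beans', 'beet': 'beets', 'potato': 'potatoes',
--         'tomato': 'tomatoes', 'pepper': 'peppers', 'strawberry': 'strawberries', 'blueberry': 'blueberries',
--         'cranberry': 'cranberries', 'raspberry': 'raspberries', 'blackberry': 'blackberries', 'cherry': 'cherries'
--     }
--
--     # Build, once, the set of every lowercased crop spelling that is accepted.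
--     accepted = set()
--     for allowed in allowed_crops:
--         a = allowed.lower()
--         accepted.add(a)
--         accepted.add(a + 's')
--         if a.endswith('s'):
--             accepted.add(a[:-1])
--         for singular, plural in plural_mappings.items():
--             if a == singular:
--                 accepted.add(plural)
--             if a == plural:
--                 accepted.add(singular)
--
--     filtered_apps = []
--     for app in application_info:
--         crops_str = app.get('Target_Crop', '') or ''
--         if not crops_str or crops_str == 'N/A':
--             continue
--         kept = [c.strip() for c in crops_str.split(',')
--                 if c.strip() and c.strip().lower() in accepted]
--         if kept:
--             filtered_app = app.copy()
--             filtered_app['Target_Crop'] = ', '.join(kept)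
--             filtered_apps.append(filtered_app)
--     return filtered_apps
-- ===== Notes on version B (the rewrite author's own statement) =====
-- stated objective: simpler
-- what changed: B precomputes, once, the set of every accepted lowercased crop spelling (each allowed crop, its +'s' plural, its stem when it ends in 's', and both directions of the plural-mapping table), so the per-crop inner scan over the allowed list and the _is_crop_variant helper are replaced by a single set-membership test.
import Mathlib
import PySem

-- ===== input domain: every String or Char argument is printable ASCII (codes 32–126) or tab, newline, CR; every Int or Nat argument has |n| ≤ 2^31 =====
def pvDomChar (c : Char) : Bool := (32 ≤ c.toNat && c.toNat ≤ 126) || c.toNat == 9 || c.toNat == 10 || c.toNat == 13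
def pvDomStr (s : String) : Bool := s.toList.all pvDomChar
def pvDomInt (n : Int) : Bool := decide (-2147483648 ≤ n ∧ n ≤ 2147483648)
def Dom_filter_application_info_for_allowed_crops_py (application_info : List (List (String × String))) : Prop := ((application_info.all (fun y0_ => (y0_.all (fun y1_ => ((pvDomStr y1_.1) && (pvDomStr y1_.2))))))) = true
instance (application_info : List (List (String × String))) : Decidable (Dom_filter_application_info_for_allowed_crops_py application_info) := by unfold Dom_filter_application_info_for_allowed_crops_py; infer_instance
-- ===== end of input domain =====

-- B replaces A's per-crop scan of the allowed list (with its plural/variant helper) by one precomputed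
-- set of every accepted lowercased spelling and a single membership test per crop (objective: simpler).

-- ===== PORT A =====
-- the two module constants (shared verbatim by both Pythons)
def pvAllowedCrops : List String :=
  ["Apple", "Blackberry", "Blueberry", "Grape", "Cherry", "Cranberry", "Peach", "Pear", "Pecan",
   "Strawberry", "Spinach", "Nectarine", "Orange", "Pepper", "Tomato", "Almond", "Apricot",
   "Potato", "Raspberry", "Walnut", "Cucumber", "Broccoli"]

def pvPluralMappings : List (String × String) :=
  [("almond", "almonds"), ("apricot", "apricots"), ("walnut", "walnuts"), ("nectarine", "nectarines"),
   ("orange", "oranges"), ("grape", "grapes"), ("bean", "beans"), ("beet", "beets"), ("potato", "potatoes"),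
   ("tomato", "tomatoes"), ("pepper", "peppers"), ("strawberry", "strawberries"), ("blueberry", "blueberries"),
   ("cranberry", "cranberries"), ("raspberry", "raspberries"), ("blackberry", "blackberries"), ("cherry", "cherries")]

-- _is_crop_variant; strings are carried as List Char (exact: String equality = toList equality);
-- the for-loop with early `return True` is the || fold over the mapping items
def is_crop_variant_py (crop allowed_crop : List Char) : Bool :=
  let crop_lower := PySem.Chars.lower crop
  let allowed_lower := PySem.Chars.lower allowed_crop
  if crop_lower == allowed_lower then true
  else if crop_lower == allowed_lower ++ ['s'] then true
  else if allowed_lower == crop_lower ++ ['s'] then true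
  else pvPluralMappings.foldl (fun r sp =>
        r || ((crop_lower == sp.1.toList && allowed_lower == sp.2.toList)
           || (crop_lower == sp.2.toList && allowed_lower == sp.1.toList))) false

-- `crops_str = app.get('Target_Crop', '') or ''` : the `or ''` is the identity on strings (only '' is falsy)
def filter_application_info_for_allowed_crops_py (application_info : List (List (String × String))) : List (List (String × String)) :=
  if application_info.isEmpty then []
  else
    application_info.foldl (fun filtered_apps app =>
      let d := PySem.Dict.mk app
      let crops_str := (d.getD "Target_Crop" "").toList
      if crops_str == [] || crops_str == "N/A".toList then filtered_apps
      else
        let crops := ((PySem.Chars.splitOn crops_str ",".toList).map PySem.Chars.strip).filter (fun c => !(c == []))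
        let allowed_crops_in_app := crops.foldl (fun acc crop =>
          let crop_matches := pvAllowedCrops.foldl (fun m allowed_crop =>
            m || (PySem.Chars.lower crop == PySem.Chars.lower allowed_crop.toList)
              || is_crop_variant_py crop allowed_crop.toList) false
          if crop_matches then acc ++ [crop] else acc) ([] : List (List Char))
        if allowed_crops_in_app == [] then filtered_apps
        else filtered_apps ++ [(d.insert "Target_Crop" (String.ofList (PySem.Chars.join ", ".toList allowed_crops_in_app))).items])
      []

-- ===== PORT B =====
-- the set `accepted` of Source B: built once from the two constants, before any application is looked at
def pvAcceptedCrops : PySem.Set (List Char) :=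
  pvAllowedCrops.foldl (fun acc allowed =>
    let a := PySem.Chars.lower allowed.toList
    let acc := PySem.Set.add acc a
    let acc := PySem.Set.add acc (a ++ ['s'])
    let acc := if PySem.Chars.endswith a ['s'] then PySem.Set.add acc (PySem.List.slice a none (some (-1))) else acc
    pvPluralMappings.foldl (fun acc2 sp =>
      let acc2 := if a == sp.1.toList then PySem.Set.add acc2 sp.2.toList else acc2
      if a == sp.2.toList then PySem.Set.add acc2 sp.1.toList else acc2) acc) PySem.Set.empty

def filter_application_info_for_allowed_crops_py_alt (application_info : List (List (String × String))) : List (List (String × String)) :=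
  if application_info.isEmpty then []
  else
    application_info.foldl (fun filtered_apps app =>
      let d := PySem.Dict.mk app
      let crops_str := (d.getD "Target_Crop" "").toList
      if crops_str == [] || crops_str == "N/A".toList then filtered_apps
      else
        let kept := ((PySem.Chars.splitOn crops_str ",".toList).map PySem.Chars.strip).filter
          (fun c => !(c == []) && PySem.Set.contains pvAcceptedCrops (PySem.Chars.lower c))
        if kept == [] then filtered_apps
        else filtered_apps ++ [(d.insert "Target_Crop" (String.ofList (PySem.Chars.join ", ".toList kept))).items])
      []

-- ===== PRECONDITION & SPEC =====
def Spec_filter_application_info_for_allowed_crops_py (application_info : List (List (String × String))) (out : List (List (String × String))) : Prop := out = filter_application_info_for_allowed_crops_py_alt application_info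
instance (application_info : List (List (String × String))) (out : List (List (String × String))) : Decidable (Spec_filter_application_info_for_allowed_crops_py application_info out) := by unfold Spec_filter_application_info_for_allowed_crops_py; infer_instance

-- ===== CLAIM (what is proved, stated in full; the proofs are below) =====
def Claim_equal_filter_application_info_for_allowed_crops_py : Prop := ∀ (application_info : List (List (String × String))), Dom_filter_application_info_for_allowed_crops_py application_info → Spec_filter_application_info_for_allowed_crops_py application_info (filter_application_info_for_allowed_crops_py application_info)

-- ===== LEMMAS AND PROOFS =====

def pvContrib (allowed : String) : List (List Char) :=
  let a := PySem.Chars.lower allowed.toList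
  [a, a ++ ['s']]
    ++ (if PySem.Chars.endswith a ['s'] then [PySem.List.slice a none (some (-1))] else [])
    ++ pvPluralMappings.flatMap (fun sp =>
         (if a == sp.1.toList then [sp.2.toList] else []) ++ (if a == sp.2.toList then [sp.1.toList] else []))

theorem pv_slice_neg_one (l : List Char) : PySem.List.slice l none (some (-1)) = l.dropLast := by
  simp [pysem]

theorem pv_foldl_or {a : Type} (l : List a) (f : a -> Bool) (b : Bool) :
    l.foldl (fun m x => m || f x) b = (b || l.any f) := by
  induction l generalizing b with
  | nil => simp
  | cons h t ih => simp [List.foldl_cons, ih, Bool.or_assoc]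

theorem pv_endswith_s_iff (l x : List Char) :
    l = x ++ ['s'] ↔ (PySem.Chars.endswith l ['s'] = true ∧ x = l.dropLast) := by
  constructor
  · rintro rfl
    exact ⟨by simp [PySem.Chars.endswith], by simp⟩
  · rintro ⟨h, rfl⟩
    simp [PySem.Chars.endswith] at h
    obtain ⟨t, rfl⟩ := h
    simp

theorem pv_if_or (a : Bool) (x : Bool) : (if a = true then true else x) = (a || x) := by
  cases a <;> simp

theorem pv_map_part (x a : List Char) :
    (pvPluralMappings.any (fun sp =>
      (x == sp.1.toList && a == sp.2.toList) || (x == sp.2.toList && a == sp.1.toList)) = true)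
    ↔ x ∈ pvPluralMappings.flatMap (fun sp =>
        (if a == sp.1.toList then [sp.2.toList] else []) ++ (if a == sp.2.toList then [sp.1.toList] else [])) := by
  simp only [List.any_eq_true, List.mem_flatMap, List.mem_append, Bool.or_eq_true,
    Bool.and_eq_true, beq_iff_eq]
  constructor
  · rintro ⟨sp, hsp, ⟨hx, ha⟩ | ⟨hx, ha⟩⟩
    · exact ⟨sp, hsp, Or.inr (by simp [ha, hx])⟩
    · exact ⟨sp, hsp, Or.inl (by simp [ha, hx])⟩
  · rintro ⟨sp, hsp, h | h⟩
    · split at h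
      · next ha =>
        simp only [List.mem_singleton] at h
        exact ⟨sp, hsp, Or.inr ⟨h, ha⟩⟩
      · exact absurd h (by simp)
    · split at h
      · next ha =>
        simp only [List.mem_singleton] at h
        exact ⟨sp, hsp, Or.inl ⟨h, ha⟩⟩
      · exact absurd h (by simp)

theorem pv_match_mem (crop : List Char) (allowed : String) :
    ((PySem.Chars.lower crop == PySem.Chars.lower allowed.toList)
      || is_crop_variant_py crop allowed.toList) = true
    ↔ PySem.Chars.lower crop ∈ pvContrib allowed := by
  unfold is_crop_variant_py pvContrib
  simp only []
  rw [pv_if_or, pv_if_or, pv_if_or, pv_foldl_or]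
  by_cases hes : PySem.Chars.endswith (PySem.Chars.lower allowed.toList) ['s'] = true
  · have h3iff : (PySem.Chars.lower allowed.toList = PySem.Chars.lower crop ++ ['s'])
        ↔ (PySem.Chars.lower crop = (PySem.Chars.lower allowed.toList).dropLast) := by
      constructor
      · intro h; exact ((pv_endswith_s_iff _ _).mp h).2
      · intro h; exact (pv_endswith_s_iff _ _).mpr ⟨hes, h⟩
    have hmap := pv_map_part (PySem.Chars.lower crop) (PySem.Chars.lower allowed.toList)
    simp only [hes, if_true, pv_slice_neg_one, Bool.or_eq_true, beq_iff_eq,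
      List.mem_append, List.mem_cons, List.not_mem_nil, or_false, Bool.false_or] at *
    rw [h3iff]
    tauto
  · have h3f : ¬ (PySem.Chars.lower allowed.toList = PySem.Chars.lower crop ++ ['s']) := by
      intro h; exact hes ((pv_endswith_s_iff _ _).mp h).1
    have hmap := pv_map_part (PySem.Chars.lower crop) (PySem.Chars.lower allowed.toList)
    simp only [hes, Bool.or_eq_true, beq_iff_eq,
      List.mem_append, List.mem_cons, List.not_mem_nil, or_false, Bool.false_or] at *
    tauto

theorem pv_mem_mfold (a : List Char) (ms : List (String × String)) (s : PySem.Set (List Char)) (x : List Char) :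
    x ∈ ms.foldl (fun acc2 sp =>
      let acc2 := if a == sp.1.toList then PySem.Set.add acc2 sp.2.toList else acc2
      if a == sp.2.toList then PySem.Set.add acc2 sp.1.toList else acc2) s
    ↔ x ∈ s ∨ x ∈ ms.flatMap (fun sp =>
        (if a == sp.1.toList then [sp.2.toList] else []) ++ (if a == sp.2.toList then [sp.1.toList] else [])) := by
  induction ms generalizing s with
  | nil => simp
  | cons hd tl ih =>
    simp only [List.foldl_cons, List.flatMap_cons, List.mem_append, ih]
    split_ifs <;> simp_all [PySem.Set.mem_add, or_assoc] 

theorem pv_mem_stepB (allowed : String) (s : PySem.Set (List Char)) (x : List Char) :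
    x ∈ (let a := PySem.Chars.lower allowed.toList
         let acc := PySem.Set.add s a
         let acc := PySem.Set.add acc (a ++ ['s'])
         let acc := if PySem.Chars.endswith a ['s'] then PySem.Set.add acc (PySem.List.slice a none (some (-1))) else acc
         pvPluralMappings.foldl (fun acc2 sp =>
           let acc2 := if a == sp.1.toList then PySem.Set.add acc2 sp.2.toList else acc2
           if a == sp.2.toList then PySem.Set.add acc2 sp.1.toList else acc2) acc)
    ↔ x ∈ s ∨ x ∈ pvContrib allowed := by
  simp only [pv_mem_mfold, pvContrib, List.mem_append, List.mem_cons]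
  split_ifs <;> simp_all [PySem.Set.mem_add, or_assoc]

theorem pv_mem_accepted (x : List Char) :
    x ∈ pvAcceptedCrops ↔ ∃ allowed ∈ pvAllowedCrops, x ∈ pvContrib allowed := by
  have gen : ∀ (l : List String) (s : PySem.Set (List Char)),
      x ∈ l.foldl (fun acc allowed =>
        let a := PySem.Chars.lower allowed.toList
        let acc := PySem.Set.add acc a
        let acc := PySem.Set.add acc (a ++ ['s'])
        let acc := if PySem.Chars.endswith a ['s'] then PySem.Set.add acc (PySem.List.slice a none (some (-1))) else acc
        pvPluralMappings.foldl (fun acc2 sp =>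
          let acc2 := if a == sp.1.toList then PySem.Set.add acc2 sp.2.toList else acc2
          if a == sp.2.toList then PySem.Set.add acc2 sp.1.toList else acc2) acc) s
      ↔ x ∈ s ∨ ∃ allowed ∈ l, x ∈ pvContrib allowed := by
    intro l
    induction l with
    | nil => simp
    | cons hd tl ih =>
      intro s
      simp only [List.foldl_cons, ih, pv_mem_stepB hd s x, List.exists_mem_cons_iff]
      tauto
  have := gen pvAllowedCrops PySem.Set.empty
  unfold pvAcceptedCrops
  simp only [this]
  simp [PySem.Set.empty]

theorem pv_match_contains (crop : List Char) :
    pvAllowedCrops.foldl (fun m allowed_crop =>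
      m || (PySem.Chars.lower crop == PySem.Chars.lower allowed_crop.toList)
        || is_crop_variant_py crop allowed_crop.toList) false
    = PySem.Set.contains pvAcceptedCrops (PySem.Chars.lower crop) := by
  have hstep : (fun (m : Bool) (allowed_crop : String) =>
      m || (PySem.Chars.lower crop == PySem.Chars.lower allowed_crop.toList)
        || is_crop_variant_py crop allowed_crop.toList)
      = (fun (m : Bool) (allowed_crop : String) =>
      m || ((PySem.Chars.lower crop == PySem.Chars.lower allowed_crop.toList)
        || is_crop_variant_py crop allowed_crop.toList)) := by
    funext m a; rw [Bool.or_assoc]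
  rw [hstep, pv_foldl_or, Bool.false_or, Bool.eq_iff_iff, List.any_eq_true,
    PySem.Set.contains_iff, pv_mem_accepted]
  constructor
  · rintro ⟨a, ha, h⟩; exact ⟨a, ha, (pv_match_mem crop a).mp h⟩
  · rintro ⟨a, ha, h⟩; exact ⟨a, ha, (pv_match_mem crop a).mpr h⟩

theorem pv_kept_eq (cs : List (List Char)) :
    ((cs.map PySem.Chars.strip).filter (fun c => !(c == []))).foldl (fun acc crop =>
        if (pvAllowedCrops.foldl (fun m allowed_crop =>
          m || (PySem.Chars.lower crop == PySem.Chars.lower allowed_crop.toList)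
            || is_crop_variant_py crop allowed_crop.toList) false) then acc ++ [crop] else acc)
      ([] : List (List Char))
    = (cs.map PySem.Chars.strip).filter
        (fun c => !(c == []) && PySem.Set.contains pvAcceptedCrops (PySem.Chars.lower c)) := by
  rw [PySem.List.foldl_append_if _ (fun c => c), List.filter_filter]
  simp only [List.map_id_fun', id, pv_match_contains]
  exact List.filter_congr (fun c _ => Bool.and_comm _ _)

theorem pv_main (info : List (List (String × String))) :
    filter_application_info_for_allowed_crops_py info
      = filter_application_info_for_allowed_crops_py_alt info := by
  unfold filter_application_info_for_allowed_crops_py filter_application_info_for_allowed_crops_py_alt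
  by_cases h : info.isEmpty = true
  · rw [if_pos h, if_pos h]
  · rw [if_neg h, if_neg h]
    congr 1
    funext fa app
    dsimp only
    by_cases hcs : ((((PySem.Dict.mk app).getD "Target_Crop" "").toList == [])
        || (((PySem.Dict.mk app).getD "Target_Crop" "").toList == "N/A".toList)) = true
    · rw [if_pos hcs, if_pos hcs]
    · rw [if_neg hcs, if_neg hcs, pv_kept_eq]

-- ===== VERDICT (by name: the statement is the Claim_ definition above) =====
theorem filter_application_info_for_allowed_crops_py_spec : Claim_equal_filter_application_info_for_allowed_crops_py := by
  intro info _
  exact pv_main info
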